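-- pv_equiv track=rewrite | github.com/Aubinx/TIPE-2021-Error-Correcting-Code | Programmes/TIPE.py | matM1
-- ===== SOURCE A (Python) =====
-- def matM1(m):#crée la matrice M1
--     M=[]
--     for i in range(m):
--         M.append([])
--         for j in range(m*m):
--             if j>=m*i and j<m*(i+1):
--                 M[i].append(1)
--             else:
--                 M[i].append(0)
--     return M
-- ===== SOURCE B (Python) =====
-- def matM1(m):  # same matrix, rows built from segment lengths (no inner loop/branch)
--     M = []
--     for i in range(m):
--         M.append([0] * (m * i) + [1] * m + [0] * (m * (m - 1 - i)))
--     return M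
-- ===== Notes on version B (the rewrite author's own statement) =====
-- stated objective: faster
-- what changed: Each row is built directly as [0]*(m*i)+[1]*m+[0]*(m*(m-1-i)) from arithmetically computed block boundaries, removing the inner loop over all m^2 columns and its per-element membership test.
import Mathlib
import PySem

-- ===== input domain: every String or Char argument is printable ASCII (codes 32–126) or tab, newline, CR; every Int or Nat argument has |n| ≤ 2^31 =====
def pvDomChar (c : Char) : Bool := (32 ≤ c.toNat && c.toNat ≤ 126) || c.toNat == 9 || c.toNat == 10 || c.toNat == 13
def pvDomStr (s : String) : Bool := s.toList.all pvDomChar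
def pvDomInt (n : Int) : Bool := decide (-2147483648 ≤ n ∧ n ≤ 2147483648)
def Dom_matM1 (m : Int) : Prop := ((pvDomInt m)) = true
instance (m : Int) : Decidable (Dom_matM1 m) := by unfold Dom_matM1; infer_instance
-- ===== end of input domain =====

-- B builds each row from segment lengths ([0]*(m*i)+[1]*m+[0]*(m*(m-1-i))) instead of
-- testing every one of the m*m columns against the block bounds; same return value.

-- ===== PORT A =====
def matM1 (m : Int) : List (List Int) :=
  (PySem.List.pyRange 0 m 1).foldl (fun M i =>
    M ++ [(PySem.List.pyRange 0 (m * m) 1).foldl (fun row j =>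
      if m * i ≤ j ∧ j < m * (i + 1) then row ++ [(1 : Int)] else row ++ [0]) []]) []

-- ===== PORT B =====
def matM1_alt (m : Int) : List (List Int) :=
  (PySem.List.pyRange 0 m 1).foldl (fun M i =>
    M ++ [List.replicate (m * i).toNat (0 : Int) ++ List.replicate m.toNat 1 ++
          List.replicate (m * (m - 1 - i)).toNat 0]) []

-- ===== PRECONDITION & SPEC =====
def Spec_matM1 (m : Int) (out : List (List Int)) : Prop := out = matM1_alt m
instance (m : Int) (out : List (List Int)) : Decidable (Spec_matM1 m out) := by unfold Spec_matM1; infer_instance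

-- ===== CLAIM (what is proved, stated in full; the proofs are below) =====
def Claim_equal_matM1 : Prop := ∀ (m : Int), Dom_matM1 m → Spec_matM1 m (matM1 m)

-- ===== LEMMAS AND PROOFS =====

-- a range on which f is constant maps to a replicate
theorem map_pyRange_const {a b : Int} {f : Int → Int} {c : Int}
    (h : ∀ x, a ≤ x → x < b → f x = c) :
    (PySem.List.pyRange a b 1).map f = List.replicate (b - a).toNat c := by
  have he : (PySem.List.pyRange a b 1).map f = (PySem.List.pyRange a b 1).map (fun _ => c) :=
    List.map_congr_left (fun x hx => by
      rw [PySem.List.mem_pyRange_one] at hx; exact h x hx.1 hx.2)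
  rw [he, List.map_const', PySem.List.length_pyRange_one]

-- A's inner loop over all columns equals B's three-segment row, for 0 ≤ i < m
theorem row_eq (m i : Int) (h0 : 0 ≤ i) (h1 : i < m) :
    (PySem.List.pyRange 0 (m * m) 1).foldl (fun row j =>
      if m * i ≤ j ∧ j < m * (i + 1) then row ++ [(1 : Int)] else row ++ [0]) []
    = List.replicate (m * i).toNat (0 : Int) ++ List.replicate m.toNat 1 ++
      List.replicate (m * (m - 1 - i)).toNat 0 := by
  have hrow : (fun (row : List Int) (j : Int) =>
      if m * i ≤ j ∧ j < m * (i + 1) then row ++ [(1 : Int)] else row ++ [0])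
      = fun row j => row ++ [if m * i ≤ j ∧ j < m * (i + 1) then (1 : Int) else 0] := by
    funext row j; split <;> rfl
  rw [hrow, PySem.List.foldl_append_singleton_eq_map, List.nil_append]
  have hm : 0 < m := lt_of_le_of_lt h0 h1
  have b1 : (0:Int) ≤ m * i := mul_nonneg hm.le h0
  have b2 : m * i ≤ m * (i + 1) := by nlinarith
  have b3 : m * (i + 1) ≤ m * m := by nlinarith
  rw [PySem.List.pyRange_one_append 0 (m * i) (m * m) b1 (le_trans b2 b3),
      PySem.List.pyRange_one_append (m * i) (m * (i + 1)) (m * m) b2 b3,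
      List.map_append, List.map_append]
  rw [map_pyRange_const (c := 0) (fun x hx hx' => by
        rw [if_neg]; intro ⟨hle, _⟩; omega),
      map_pyRange_const (c := 1) (fun x hx hx' => by rw [if_pos ⟨hx, hx'⟩]),
      map_pyRange_const (c := 0) (fun x hx hx' => by
        rw [if_neg]; intro ⟨_, hlt⟩; omega)]
  have e1 : (m * i - 0).toNat = (m * i).toNat := by omega
  have e2 : (m * (i + 1) - m * i).toNat = m.toNat := by
    have : m * (i + 1) - m * i = m := by ring
    omega
  have e3 : (m * m - m * (i + 1)).toNat = (m * (m - 1 - i)).toNat := by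
    have : m * m - m * (i + 1) = m * (m - 1 - i) := by ring
    omega
  rw [e1, e2, e3, List.append_assoc]

-- ===== VERDICT (by name: the statement is the Claim_ definition above) =====
theorem matM1_spec : Claim_equal_matM1 := by
  intro m _
  unfold Spec_matM1 matM1 matM1_alt
  rw [PySem.List.foldl_append_singleton_eq_map, PySem.List.foldl_append_singleton_eq_map]
  refine congrArg _ (List.map_congr_left fun i hi => ?_)
  rw [PySem.List.mem_pyRange_one] at hi
  exact row_eq m i hi.1 hi.2
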